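-- pv_equiv track=rewrite | github.com/nikhilpolpakkara/MN_Colab | Streamlit/DBOps/TxtOps.py | find_lines_between_keywords
-- ===== SOURCE A (Python) =====
-- def find_lines_between_keywords(lines, start_keyword, end_keyword):
--     result = []
--     inside_block = False
--
--     for line in lines:
--         if line.startswith(start_keyword):
--             inside_block = True
--             try:
--                 result.append(line.split()[1])
--             except:
--                 pass
--         elif inside_block:
--             try:
--                 result.append(line.split()[1])
--             except:
--                 pass
--             if line.startswith(end_keyword):
--                 inside_block = False
--                 break  # Stop capturing lines when the end keyword is found
--
--     return result
-- ===== SOURCE B (Python) =====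
-- def find_lines_between_keywords(lines, start_keyword, end_keyword):
--     # Two-phase: locate block start, then collect second tokens until the end line.
--     i = 0
--     n = len(lines)
--     while i < n and not lines[i].startswith(start_keyword):
--         i += 1
--     result = []
--     for line in lines[i:]:
--         parts = line.split()
--         if len(parts) > 1:
--             result.append(parts[1])
--         if line.startswith(end_keyword) and not line.startswith(start_keyword):
--             break
--     return result
-- ===== Notes on version B (the rewrite author's own statement) =====
-- stated objective: simpler
-- what changed: Replaced the inside_block flag state machine by a two-phase find-then-collect structure: first scan for the first start-prefixed line, then collect every line's second token until an end-prefixed (and not start-prefixed) line.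
import Mathlib
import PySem

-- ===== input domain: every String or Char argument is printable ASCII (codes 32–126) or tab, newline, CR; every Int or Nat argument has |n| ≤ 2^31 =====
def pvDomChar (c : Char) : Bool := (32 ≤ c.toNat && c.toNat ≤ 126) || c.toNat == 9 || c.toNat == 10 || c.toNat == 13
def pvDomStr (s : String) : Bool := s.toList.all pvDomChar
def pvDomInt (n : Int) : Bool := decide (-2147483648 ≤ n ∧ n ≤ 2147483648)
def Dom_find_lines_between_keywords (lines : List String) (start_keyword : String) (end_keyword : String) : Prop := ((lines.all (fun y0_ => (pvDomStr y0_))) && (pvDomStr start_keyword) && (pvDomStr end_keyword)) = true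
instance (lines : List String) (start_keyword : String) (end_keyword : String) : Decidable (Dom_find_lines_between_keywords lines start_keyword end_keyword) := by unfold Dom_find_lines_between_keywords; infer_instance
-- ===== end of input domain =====

-- ===== PORT A =====
-- B differs from A by decomposition only (flagged state machine vs find-then-collect); same return values.
-- second token of line.split(), or nothing on IndexError (the bare except: pass)
def pvTokA (line : String) : List String :=
  match PySem.List.pyGet? (PySem.Str.split₀ line) 1 with
  | some t => [t]
  | none => []

-- A's single loop over lines with the inside_block flag; break modelled by returning.
def pvLoopA (start_keyword end_keyword : String) : List String → Bool → List String
  | [], _ => []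
  | l :: rest, inside =>
    if PySem.Str.startswith l start_keyword then
      pvTokA l ++ pvLoopA start_keyword end_keyword rest true
    else if inside then
      pvTokA l ++ (if PySem.Str.startswith l end_keyword then [] else pvLoopA start_keyword end_keyword rest inside)
    else
      pvLoopA start_keyword end_keyword rest inside

def find_lines_between_keywords (lines : List String) (start_keyword : String) (end_keyword : String) : List String :=
  pvLoopA start_keyword end_keyword lines false

-- ===== PORT B =====
def pvTokB (line : String) : List String :=
  let parts := PySem.Str.split₀ line
  if 1 < parts.length then [parts[1]!] else []

-- B's collect phase: emit tokens until an end-prefixed, non-start-prefixed line.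
def pvCollectB (start_keyword end_keyword : String) : List String → List String
  | [] => []
  | l :: rest =>
    pvTokB l ++
      (if PySem.Str.startswith l end_keyword && !PySem.Str.startswith l start_keyword then []
       else pvCollectB start_keyword end_keyword rest)

def find_lines_between_keywords_alt (lines : List String) (start_keyword : String) (end_keyword : String) : List String :=
  pvCollectB start_keyword end_keyword (lines.dropWhile (fun l => !PySem.Str.startswith l start_keyword))

-- ===== PRECONDITION & SPEC =====
def Spec_find_lines_between_keywords (lines : List String) (start_keyword : String) (end_keyword : String) (out : List String) : Prop := out = find_lines_between_keywords_alt lines start_keyword end_keyword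
instance (lines : List String) (start_keyword : String) (end_keyword : String) (out : List String) : Decidable (Spec_find_lines_between_keywords lines start_keyword end_keyword out) := by unfold Spec_find_lines_between_keywords; infer_instance

-- ===== CLAIM =====
def Claim_equal_find_lines_between_keywords : Prop := ∀ (lines : List String) (start_keyword : String) (end_keyword : String), Dom_find_lines_between_keywords lines start_keyword end_keyword → Spec_find_lines_between_keywords lines start_keyword end_keyword (find_lines_between_keywords lines start_keyword end_keyword)

-- ===== LEMMAS AND PROOFS =====
theorem pvTok_eq (line : String) : pvTokA line = pvTokB line := by
  rcases hp : PySem.Str.split₀ line with _ | ⟨a, _ | ⟨b, rest⟩⟩ <;>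
    simp [pvTokA, pvTokB, hp, PySem.List.pyGet?, PySem.List.pyIdx?]

theorem pvLoopA_true (s e : String) (lines : List String) :
    pvLoopA s e lines true = pvCollectB s e lines := by
  induction lines with
  | nil => rfl
  | cons l rest ih =>
    by_cases hs : PySem.Chars.startswith l.toList s.toList = true <;>
      by_cases he : PySem.Chars.startswith l.toList e.toList = true <;>
        simp [pvLoopA, pvCollectB, hs, he, ih, pvTok_eq]

theorem pvLoopA_false (s e : String) (lines : List String) :
    pvLoopA s e lines false =
      pvCollectB s e (lines.dropWhile (fun l => !PySem.Str.startswith l s)) := by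
  induction lines with
  | nil => rfl
  | cons l rest ih =>
    by_cases hs : PySem.Chars.startswith l.toList s.toList = true
    · simp [pvLoopA, pvCollectB, List.dropWhile, hs, pvTok_eq, pvLoopA_true]
    · simp [pvLoopA, List.dropWhile, hs, ih]

-- ===== VERDICT =====
theorem find_lines_between_keywords_spec : Claim_equal_find_lines_between_keywords := by
  intro lines s e _
  unfold Spec_find_lines_between_keywords find_lines_between_keywords find_lines_between_keywords_alt
  exact pvLoopA_false s e lines
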